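-- pv_equiv track=rewrite | github.com/RSDWArchive/RSDWArchive | website/tools/Pywikibot/scripts/generate_loot_enemy_pages.py | extract_journal_affinities
-- ===== SOURCE A (Python) =====
-- def extract_journal_affinities(journal_text: str) -> tuple[str | None, str | None, str]:
--     lines = [line.strip() for line in journal_text.replace("\r\n", "\n").split("\n")]
--     weakness = None
--     resistance = None
--     kept_lines: list[str] = []
--     for line in lines:
--         if line.lower().startswith("weakness:"):
--             value = line.split(":", 1)[1].strip()
--             if value:
--                 weakness = value
--             continue
--         if line.lower().startswith("resistance:"):
--             value = line.split(":", 1)[1].strip()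
--             if value:
--                 resistance = value
--             continue
--         kept_lines.append(line)
--     cleaned = "\n".join(kept_lines).strip()
--     return weakness, resistance, cleaned
-- ===== SOURCE B (Python) =====
-- def extract_journal_affinities(journal_text: str) -> tuple[str | None, str | None, str]:
--     lines = [line.strip() for line in journal_text.replace("\r\n", "\n").split("\n")]
--
--     def last_value(prefix: str):
--         vals = [line.split(":", 1)[1].strip()
--                 for line in lines if line.lower().startswith(prefix)]
--         vals = [v for v in vals if v]
--         return vals[-1] if vals else None
--
--     kept = [line for line in lines
--             if not (line.lower().startswith("weakness:")
--                     or line.lower().startswith("resistance:"))]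
--     return last_value("weakness:"), last_value("resistance:"), "\n".join(kept).strip()
-- ===== Notes on version B (the rewrite author's own statement) =====
-- stated objective: simpler
-- what changed: Replaces the single interleaved loop with mutable state by three independent declarative passes: a comprehension keeping non-affinity lines, and for each prefix a comprehension of colon-values with a last-non-empty selection.
import Mathlib
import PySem

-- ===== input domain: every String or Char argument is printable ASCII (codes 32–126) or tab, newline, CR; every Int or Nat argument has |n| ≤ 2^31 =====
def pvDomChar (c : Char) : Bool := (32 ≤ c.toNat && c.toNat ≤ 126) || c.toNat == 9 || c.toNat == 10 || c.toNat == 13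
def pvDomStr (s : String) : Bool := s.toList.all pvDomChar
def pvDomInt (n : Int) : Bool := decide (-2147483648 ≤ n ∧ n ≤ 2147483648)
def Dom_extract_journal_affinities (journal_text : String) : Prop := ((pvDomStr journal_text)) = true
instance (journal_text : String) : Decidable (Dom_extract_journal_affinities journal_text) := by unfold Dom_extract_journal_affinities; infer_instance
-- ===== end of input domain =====

-- B replaces A's single interleaved loop with mutable state by independent declarative
-- passes (a filter for kept lines, per-prefix value lists with last-non-empty selection);
-- objective: simpler.

-- ===== PORT A =====
-- line.split(":", 1)[1].strip(); the [1] index always exists where this is called because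
-- the branch guard guarantees the line contains ':', so the .getD defaults are never reached.
def pvColonValA (line : String) : String :=
  PySem.Str.strip (((PySem.Str.splitMax? line ":" 1).getD []).getD 1 "")

def extract_journal_affinities (journal_text : String) : Option String × Option String × String :=
  let lines := ((PySem.Str.split? (PySem.Str.replace journal_text "\r\n" "\n") "\n").getD []).map PySem.Str.strip
  let st := lines.foldl (fun (st : Option String × Option String × List String) line =>
    if PySem.Str.startswith (PySem.Str.lower line) "weakness:" then
      let value := pvColonValA line
      if value ≠ "" then (some value, st.2.1, st.2.2) else st
    else if PySem.Str.startswith (PySem.Str.lower line) "resistance:" then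
      let value := pvColonValA line
      if value ≠ "" then (st.1, some value, st.2.2) else st
    else (st.1, st.2.1, st.2.2 ++ [line])) (none, none, [])
  (st.1, st.2.1, PySem.Str.strip (PySem.Str.join "\n" st.2.2))

-- ===== PORT B =====
-- last_value(prefix): values after the first colon of matching lines, last non-empty one.
def pvLastValue (lines : List String) (pre : String) : Option String :=
  let vals := (lines.filter (fun l => PySem.Str.startswith (PySem.Str.lower l) pre)).map
      (fun l => PySem.Str.strip (((PySem.Str.splitMax? l ":" 1).getD []).getD 1 ""))
  (vals.filter (fun v => v ≠ "")).getLast?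

def extract_journal_affinities_alt (journal_text : String) : Option String × Option String × String :=
  let lines := ((PySem.Str.split? (PySem.Str.replace journal_text "\r\n" "\n") "\n").getD []).map PySem.Str.strip
  let kept := lines.filter (fun l =>
    !(PySem.Str.startswith (PySem.Str.lower l) "weakness:" ||
      PySem.Str.startswith (PySem.Str.lower l) "resistance:"))
  (pvLastValue lines "weakness:", pvLastValue lines "resistance:",
   PySem.Str.strip (PySem.Str.join "\n" kept))

-- ===== PRECONDITION & SPEC =====
def Spec_extract_journal_affinities (journal_text : String) (out : Option String × Option String × String) : Prop := out = extract_journal_affinities_alt journal_text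
instance (journal_text : String) (out : Option String × Option String × String) : Decidable (Spec_extract_journal_affinities journal_text out) := by unfold Spec_extract_journal_affinities; infer_instance

-- ===== CLAIM (what is proved, stated in full; the proofs are below) =====
def Claim_equal_extract_journal_affinities : Prop := ∀ (journal_text : String), Dom_extract_journal_affinities journal_text → Spec_extract_journal_affinities journal_text (extract_journal_affinities journal_text)

-- ===== LEMMAS AND PROOFS =====

theorem pv_getLast?_cons_or {α : Type} (a : α) (xs : List α) :
    (a :: xs).getLast? = xs.getLast?.or (some a) := by
  rw [← List.singleton_append, List.getLast?_append]; rfl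

-- a line cannot start with both prefixes ('w' ≠ 'r')
theorem pv_not_both (l : String)
    (h : PySem.Str.startswith (PySem.Str.lower l) "weakness:" = true) :
    PySem.Str.startswith (PySem.Str.lower l) "resistance:" = false := by
  simp only [PySem.Str.startswith_eq] at *
  rw [PySem.Chars.startswith_iff] at h
  obtain ⟨u, hu⟩ := h
  rw [Bool.eq_false_iff, Ne, PySem.Chars.startswith_iff, ← hu]
  intro h2
  simp [List.cons_prefix_cons] at h2

-- the head line's contribution to pvLastValue
def pvContrib (l : String) (p : String) : Option String :=
  if PySem.Str.startswith (PySem.Str.lower l) p then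
    (if pvColonValA l ≠ "" then some (pvColonValA l) else none)
  else none

theorem pvLastValue_cons (l : String) (ls : List String) (p : String) :
    pvLastValue (l :: ls) p = (pvLastValue ls p).or (pvContrib l p) := by
  unfold pvLastValue pvContrib pvColonValA
  simp only [List.filter_cons]
  by_cases h : PySem.Str.startswith (PySem.Str.lower l) p = true
  · rw [if_pos h, if_pos h, List.map_cons, List.filter_cons]
    by_cases hv : PySem.Str.strip (((PySem.Str.splitMax? l ":" 1).getD []).getD 1 "") = ""
    · simp only [hv, ne_eq, not_true_eq_false, decide_false, Bool.false_eq_true, if_false,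
        if_neg, Option.or_none, Option.none_or]
    · simp only [hv, ne_eq, not_false_eq_true, decide_true, if_true, pv_getLast?_cons_or]
  · rw [if_neg h, if_neg h, Option.or_none]

theorem pv_foldl_char (ls : List String) (w0 r0 : Option String) (k0 : List String) :
    ls.foldl (fun (st : Option String × Option String × List String) line =>
      if PySem.Str.startswith (PySem.Str.lower line) "weakness:" then
        (if pvColonValA line ≠ "" then (some (pvColonValA line), st.2.1, st.2.2) else st)
      else if PySem.Str.startswith (PySem.Str.lower line) "resistance:" then
        (if pvColonValA line ≠ "" then (st.1, some (pvColonValA line), st.2.2) else st)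
      else (st.1, st.2.1, st.2.2 ++ [line])) (w0, r0, k0) =
    ((pvLastValue ls "weakness:").or w0,
     (pvLastValue ls "resistance:").or r0,
     k0 ++ ls.filter (fun l =>
       !(PySem.Str.startswith (PySem.Str.lower l) "weakness:" ||
         PySem.Str.startswith (PySem.Str.lower l) "resistance:"))) := by
  induction ls generalizing w0 r0 k0 with
  | nil => simp only [List.foldl_nil, pvLastValue, List.filter_nil, List.map_nil,
      List.getLast?_nil, Option.none_or, List.append_nil]
  | cons l ls ih =>
    simp only [List.foldl_cons, List.filter_cons, pvLastValue_cons, Option.or_assoc]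
    by_cases h1 : PySem.Str.startswith (PySem.Str.lower l) "weakness:" = true
    · have h2 := pv_not_both l h1
      by_cases hv : pvColonValA l = ""
      · simp only [h1, h2, hv, pvContrib, if_true, ne_eq, not_true_eq_false, if_false,
          Bool.true_or, Bool.not_true, Bool.false_eq_true, ih, Option.or_none,
          Option.none_or]
      · simp only [h1, h2, hv, pvContrib, if_true, ne_eq, not_false_eq_true,
          Bool.true_or, Bool.not_true, Bool.false_eq_true, if_false, ih,
          Option.some_or, Option.or_none, Option.none_or]
    · by_cases h2 : PySem.Str.startswith (PySem.Str.lower l) "resistance:" = true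
      · by_cases hv : pvColonValA l = ""
        · simp only [h1, h2, hv, pvContrib, Bool.false_eq_true, if_false, if_true, ne_eq,
            not_true_eq_false, ih, Option.none_or, Bool.false_or, Bool.not_true]
        · simp only [h1, h2, hv, pvContrib, Bool.false_eq_true, if_false, if_true, ne_eq,
            not_false_eq_true, Bool.false_or, Bool.not_true, ih,
            Option.some_or, Option.none_or]
      · simp only [h1, h2, pvContrib, Bool.false_eq_true, if_false, Bool.false_or,
          Bool.not_false, if_true, ih, Option.none_or, List.append_assoc,
          List.singleton_append]

-- ===== VERDICT (by name: the statement is the Claim_ definition above) =====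
theorem extract_journal_affinities_spec : Claim_equal_extract_journal_affinities := by
  intro journal_text _
  unfold Spec_extract_journal_affinities
  show extract_journal_affinities journal_text = _
  simp only [extract_journal_affinities, extract_journal_affinities_alt]
  rw [pv_foldl_char]
  simp only [Option.or_none, List.nil_append]
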